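-- pv_equiv track=rewrite | github.com/boadamm/cmp4501 | sudoku/csp.py | peers_map
-- ===== SOURCE A (Python) =====
-- Cell = tuple[int, int]  # (row, col) helper alias
--
-- def peers_map(units: list[list[Cell]]) -> dict[Cell, set[Cell]]:
--     """Return dictionary mapping each cell to its peer cells (sharing a unit).
--
--     A cell's peers are all other cells in the same row, column, or box.
--
--     Args:
--         units (list[list[Cell]]): A list of all units (rows, columns, boxes).
--
--     Returns:
--         dict[Cell, set[Cell]]: A dictionary mapping each cell to a set of its
--                                peer cells.
--     """
--     peers: dict[Cell, set[Cell]] = {}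
--
--     # First, identify which units each cell belongs to
--     cell_to_units_map: dict[Cell, list[list[Cell]]] = {}
--     for unit in units:
--         for cell in unit:
--             if cell not in cell_to_units_map:
--                 cell_to_units_map[cell] = []
--             cell_to_units_map[cell].append(unit)
--
--     # Then build peers using the cell_to_units_map
--     for cell, units_for_this_cell in cell_to_units_map.items():
--         peers[cell] = set()
--         for unit in units_for_this_cell:
--             for peer_cell in unit:
--                 if peer_cell != cell:
--                     peers[cell].add(peer_cell)
--     return peers
-- ===== SOURCE B (Python) =====
-- def peers_map(units):
--     """Single pass over units: no intermediate cell->units index."""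
--     peers = {}
--     for unit in units:
--         for cell in unit:
--             peer_set = peers.setdefault(cell, set())
--             for peer_cell in unit:
--                 if peer_cell != cell:
--                     peer_set.add(peer_cell)
--     return peers
-- ===== Notes on version B (the rewrite author's own statement) =====
-- stated objective: simpler
-- what changed: B drops A's intermediate cell-to-units index and its second items pass: one scan over units adds, via setdefault, each unit's other cells directly to the cell's peer set.
import Mathlib
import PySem

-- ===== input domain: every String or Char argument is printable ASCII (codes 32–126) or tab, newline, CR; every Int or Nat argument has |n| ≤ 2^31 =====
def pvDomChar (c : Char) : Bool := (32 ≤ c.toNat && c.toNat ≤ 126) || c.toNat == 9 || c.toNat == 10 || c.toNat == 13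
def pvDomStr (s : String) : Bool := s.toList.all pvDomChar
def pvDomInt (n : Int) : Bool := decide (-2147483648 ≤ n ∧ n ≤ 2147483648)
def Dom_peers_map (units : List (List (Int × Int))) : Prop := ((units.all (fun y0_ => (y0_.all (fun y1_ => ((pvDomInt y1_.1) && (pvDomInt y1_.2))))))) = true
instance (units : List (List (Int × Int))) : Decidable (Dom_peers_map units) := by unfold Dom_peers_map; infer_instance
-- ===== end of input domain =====

-- B builds the peers dict in a single scan over units (setdefault + direct adds), dropping A's intermediate cell-to-units index; objective: simpler.


-- ===== PORT A =====
-- literal transliteration of A: first build cell_to_units_map, then a second pass over its items builds each peer set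
def peers_map (units : List (List (Int × Int))) : List (Int × Int × List (Int × Int)) :=
  let cellToUnitsMap : PySem.Dict (Int × Int) (List (List (Int × Int))) :=
    units.foldl (fun m unit =>
      unit.foldl (fun m cell =>
        (if m.contains cell then m else m.insert cell []).modify cell [] (fun l => l ++ [unit])) m)
      PySem.Dict.empty
  let peers : PySem.Dict (Int × Int) (PySem.Set (Int × Int)) :=
    cellToUnitsMap.items.foldl (fun p cu =>
      cu.2.foldl (fun p unit =>
        unit.foldl (fun p pc =>
          if pc ≠ cu.1 then p.modify cu.1 PySem.Set.empty (fun s => PySem.Set.add s pc) else p) p)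
        (p.insert cu.1 PySem.Set.empty))
      PySem.Dict.empty
  peers.items.map (fun cu => (cu.1.1, cu.1.2, cu.2))   -- dict[Cell, set[Cell]] under the type convention

-- ===== PORT B =====
-- literal transliteration of B: one scan over units; setdefault the cell's set, add the unit's other cells
def peers_map_alt (units : List (List (Int × Int))) : List (Int × Int × List (Int × Int)) :=
  let peers : PySem.Dict (Int × Int) (PySem.Set (Int × Int)) :=
    units.foldl (fun p unit =>
      unit.foldl (fun p cell =>
        let p1 := p.setdefault cell PySem.Set.empty
        unit.foldl (fun p pc =>
          if pc ≠ cell then p.modify cell PySem.Set.empty (fun s => PySem.Set.add s pc) else p) p1) p)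
      PySem.Dict.empty
  peers.items.map (fun cu => (cu.1.1, cu.1.2, cu.2))

-- ===== PRECONDITION & SPEC =====
def Spec_peers_map (units : List (List (Int × Int))) (out : List (Int × Int × List (Int × Int))) : Prop := out = peers_map_alt units
instance (units : List (List (Int × Int))) (out : List (Int × Int × List (Int × Int))) : Decidable (Spec_peers_map units out) := by unfold Spec_peers_map; infer_instance

-- ===== CLAIM (what is proved, stated in full; the proofs are below) =====
def Claim_equal_peers_map : Prop := ∀ (units : List (List (Int × Int))), Dom_peers_map units → Spec_peers_map units (peers_map units)

-- ===== LEMMAS AND PROOFS =====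

-- the unit scan flattened to (cell, unit) events in order
def pvPairs (us : List (List (Int × Int))) : List ((Int × Int) × List (Int × Int)) :=
  us.flatMap (fun u => u.map (fun c => (c, u)))

-- add all cells of unit u other than c to the set s (the shared inner loop of both programs)
def pvInner (c : Int × Int) (u : List (Int × Int)) (s : PySem.Set (Int × Int)) : PySem.Set (Int × Int) :=
  u.foldl (fun s x => if x ≠ c then PySem.Set.add s x else s) s

-- re-inserting the value a key already holds is a no-op (nodup keys)
theorem pv_insert_getD_self {ν : Type} (d : PySem.Dict (Int × Int) ν) (k : Int × Int) (d0 : ν)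
    (hnd : d.keys.Nodup) (h : d.contains k = true) : d.insert k (d.getD k d0) = d := by
  apply PySem.Dict.ext
  rw [PySem.Dict.items_insert_of_contains _ _ h]
  conv_rhs => rw [← List.map_id d.items]
  apply List.map_congr_left
  intro pr hpr
  obtain ⟨a, b⟩ := pr
  by_cases hk : a = k
  · have hg : d.getD a d0 = b := PySem.Dict.getD_of_mem_items _ hpr hnd d0
    subst hk
    simp [hg]
  · simp [hk]

-- the modify-chain over a unit starting from an insert collapses to a single insert of pvInner
theorem pv_chain (u : List (Int × Int)) (p : PySem.Dict (Int × Int) (PySem.Set (Int × Int)))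
    (c : Int × Int) (s : PySem.Set (Int × Int)) :
    u.foldl (fun p pc => if pc ≠ c then p.modify c PySem.Set.empty (fun s => PySem.Set.add s pc) else p)
        (p.insert c s)
      = p.insert c (pvInner c u s) := by
  induction u generalizing s with
  | nil => simp [pvInner]
  | cons x xs ih =>
    rw [List.foldl_cons]
    by_cases h : x ≠ c
    · rw [if_pos h]
      have hm : (p.insert c s).modify c PySem.Set.empty (fun s => PySem.Set.add s x)
          = p.insert c (PySem.Set.add s x) := by
        simp [PySem.Dict.modify, PySem.Dict.getD_insert_self, PySem.Dict.insert_insert_self]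
      rw [hm, ih]
      simp [pvInner, List.foldl_cons, h]
    · rw [if_neg h, ih]
      have hx := not_not.mp h
      simp [pvInner, List.foldl_cons, hx]

-- B's per-cell step (setdefault + modify-chain) is a single insert of pvInner
theorem pv_cellstep (u : List (Int × Int)) (p : PySem.Dict (Int × Int) (PySem.Set (Int × Int)))
    (c : Int × Int) (hnd : p.keys.Nodup) :
    u.foldl (fun p pc => if pc ≠ c then p.modify c PySem.Set.empty (fun s => PySem.Set.add s pc) else p)
        (p.setdefault c PySem.Set.empty)
      = p.insert c (pvInner c u (p.getD c PySem.Set.empty)) := by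
  by_cases h : p.contains c = true
  · rw [PySem.Dict.setdefault_of_contains _ _ h]
    conv_lhs => rw [← pv_insert_getD_self p c PySem.Set.empty hnd h]
    rw [pv_chain]
  · have h' : p.contains c = false := by simpa using h
    rw [PySem.Dict.setdefault_of_not_contains _ _ h', pv_chain,
      PySem.Dict.getD_of_not_contains _ _ h']

-- the canonical grouping fold both programs reduce to
def pvGroup (L : List ((Int × Int) × List (Int × Int)))
    (d : PySem.Dict (Int × Int) (PySem.Set (Int × Int))) : PySem.Dict (Int × Int) (PySem.Set (Int × Int)) :=
  L.foldl (fun d cu => d.insert cu.1 (pvInner cu.1 cu.2 (d.getD cu.1 PySem.Set.empty))) d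

theorem pv_getD_group (L : List ((Int × Int) × List (Int × Int)))
    (d : PySem.Dict (Int × Int) (PySem.Set (Int × Int))) (k : Int × Int) :
    (pvGroup L d).getD k PySem.Set.empty
      = (L.filter (fun cu => cu.1 == k)).foldl (fun s cu => pvInner k cu.2 s) (d.getD k PySem.Set.empty) := by
  induction L generalizing d with
  | nil => simp [pvGroup]
  | cons cu rest ih =>
    have hstep : pvGroup (cu :: rest) d
        = pvGroup rest (d.insert cu.1 (pvInner cu.1 cu.2 (d.getD cu.1 PySem.Set.empty))) := rfl
    rw [hstep, ih]
    by_cases h : cu.1 = k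
    · subst h
      simp
    · have hb : (cu.1 == k) = false := by simpa using h
      simp [hb, PySem.Dict.getD_insert, Ne.symm h]

-- one unit of B's scan is the grouping fold of that unit's (cell, unit) events
theorem pv_unit_step (u l : List (Int × Int)) (p : PySem.Dict (Int × Int) (PySem.Set (Int × Int)))
    (hnd : p.keys.Nodup) :
    l.foldl (fun p cell =>
      let p1 := p.setdefault cell PySem.Set.empty
      u.foldl (fun p pc =>
        if pc ≠ cell then p.modify cell PySem.Set.empty (fun s => PySem.Set.add s pc) else p) p1) p
      = pvGroup (l.map (fun c => (c, u))) p := by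
  induction l generalizing p hnd with
  | nil => simp [pvGroup]
  | cons c cs ih =>
    rw [List.foldl_cons, List.map_cons]
    show cs.foldl _ (u.foldl _ (p.setdefault c PySem.Set.empty)) = _
    rw [pv_cellstep u p c hnd]
    have hstep : pvGroup ((c, u) :: cs.map (fun c => (c, u))) p
        = pvGroup (cs.map (fun c => (c, u))) (p.insert c (pvInner c u (p.getD c PySem.Set.empty))) := rfl
    rw [hstep]
    exact ih _ (PySem.Dict.nodup_keys_insert _ _ _ hnd)

-- B's dict is the grouping fold of the flattened events
theorem pv_B_eq_group (us : List (List (Int × Int))) (p : PySem.Dict (Int × Int) (PySem.Set (Int × Int)))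
    (hnd : p.keys.Nodup) :
    us.foldl (fun (p : PySem.Dict (Int × Int) (PySem.Set (Int × Int))) unit =>
      unit.foldl (fun p cell =>
        let p1 := p.setdefault cell PySem.Set.empty
        unit.foldl (fun p pc =>
          if pc ≠ cell then p.modify cell PySem.Set.empty (fun s => PySem.Set.add s pc) else p) p1) p) p
      = pvGroup (pvPairs us) p := by
  induction us generalizing p hnd with
  | nil => simp [pvPairs, pvGroup]
  | cons u rest ih =>
    rw [List.foldl_cons, pv_unit_step u u p hnd]
    have hnd2 : (pvGroup (u.map (fun c => (c, u))) p).keys.Nodup := by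
      unfold pvGroup
      exact PySem.Dict.nodup_keys_foldl_insert_key _
        (fun cu : (Int × Int) × List (Int × Int) => cu.1)
        (fun d cu => pvInner cu.1 cu.2 (d.getD cu.1 PySem.Set.empty)) p hnd
    rw [ih _ hnd2]
    have hsplit : pvPairs (u :: rest) = u.map (fun c => (c, u)) ++ pvPairs rest := by
      simp [pvPairs]
    rw [hsplit]
    unfold pvGroup
    rw [List.foldl_append]

-- A's first pass: the redundant insert-if-absent before modify is a no-op
theorem pv_if_modify (d : PySem.Dict (Int × Int) (List (List (Int × Int)))) (c : Int × Int)
    (f : List (List (Int × Int)) → List (List (Int × Int))) :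
    (if d.contains c then d else d.insert c []).modify c [] f = d.modify c [] f := by
  by_cases h : d.contains c = true
  · simp [h]
  · have h' : d.contains c = false := by simpa using h
    simp [h', PySem.Dict.modify, PySem.Dict.getD_insert_self, PySem.Dict.insert_insert_self,
      PySem.Dict.getD_of_not_contains _ _ h']

-- A's cell_to_units_map is the flattened modify-append fold
theorem pv_c2u_flat (us : List (List (Int × Int))) (d : PySem.Dict (Int × Int) (List (List (Int × Int)))) :
    us.foldl (fun m unit =>
      unit.foldl (fun m cell =>
        (if m.contains cell then m else m.insert cell []).modify cell [] (fun l => l ++ [unit])) m) d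
      = (pvPairs us).foldl (fun m p => m.modify p.1 [] (fun l => l ++ [p.2])) d := by
  induction us generalizing d with
  | nil => simp [pvPairs]
  | cons u rest ih =>
    rw [List.foldl_cons, ih]
    have hsplit : pvPairs (u :: rest) = u.map (fun c => (c, u)) ++ pvPairs rest := by
      simp [pvPairs]
    rw [hsplit, List.foldl_append, List.foldl_map]
    have hu : ∀ (d : PySem.Dict (Int × Int) (List (List (Int × Int)))),
        u.foldl (fun m cell =>
          (if m.contains cell then m else m.insert cell []).modify cell [] (fun l => l ++ [u])) d
        = u.foldl (fun m cell => m.modify cell [] (fun l => l ++ [u])) d := by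
      intro d
      exact PySem.List.foldl_congr_mem _ _ _ _ (fun acc x _ => pv_if_modify acc x _)
    rw [hu]

-- A's second-pass body collapses to one insert of the accumulated peer set
def pvVal (c : Int × Int) (ul : List (List (Int × Int))) : PySem.Set (Int × Int) :=
  ul.foldl (fun s u => pvInner c u s) PySem.Set.empty

theorem pv_buildstep (ul : List (List (Int × Int))) (p : PySem.Dict (Int × Int) (PySem.Set (Int × Int)))
    (c : Int × Int) :
    ul.foldl (fun p unit =>
      unit.foldl (fun p pc =>
        if pc ≠ c then p.modify c PySem.Set.empty (fun s => PySem.Set.add s pc) else p) p)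
      (p.insert c PySem.Set.empty)
      = p.insert c (pvVal c ul) := by
  suffices h : ∀ s, ul.foldl (fun p unit =>
      unit.foldl (fun p pc =>
        if pc ≠ c then p.modify c PySem.Set.empty (fun s => PySem.Set.add s pc) else p) p)
      (p.insert c s) = p.insert c (ul.foldl (fun s u => pvInner c u s) s) by
    simpa [pvVal] using h PySem.Set.empty
  intro s
  induction ul generalizing s with
  | nil => simp
  | cons u rest ih =>
    rw [List.foldl_cons, pv_chain, List.foldl_cons]
    exact ih _

-- the two ports agree
theorem pv_main (us : List (List (Int × Int))) : peers_map us = peers_map_alt us := by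
  simp only [peers_map, peers_map_alt]
  rw [pv_c2u_flat, pv_B_eq_group us PySem.Dict.empty PySem.Dict.nodup_keys_empty]
  congr 1
  -- A side: collapse the second pass into fresh inserts over the items of the first pass
  have hndC : ((pvPairs us).foldl (fun m p => m.modify p.1 [] (fun l => l ++ [p.2]))
      PySem.Dict.empty).keys.Nodup :=
    PySem.Dict.nodup_keys_foldl_modify_key (pvPairs us) (fun p => p.1) []
      (fun _ p => fun l => l ++ [p.2]) PySem.Dict.empty PySem.Dict.nodup_keys_empty
  have hbody := PySem.List.foldl_congr_mem
    (((pvPairs us).foldl (fun m p => m.modify p.1 [] (fun l => l ++ [p.2])) PySem.Dict.empty).items)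
    (fun (p : PySem.Dict (Int × Int) (PySem.Set (Int × Int))) cu =>
      cu.2.foldl (fun p unit =>
        unit.foldl (fun p pc =>
          if pc ≠ cu.1 then p.modify cu.1 PySem.Set.empty (fun s => PySem.Set.add s pc) else p) p)
        (p.insert cu.1 PySem.Set.empty))
    (fun p cu => p.insert cu.1 (pvVal cu.1 cu.2))
    PySem.Dict.empty
    (fun acc cu _ => pv_buildstep cu.2 acc cu.1)
  rw [hbody]
  have hfresh := PySem.Dict.items_foldl_insert_fresh
    (l := ((pvPairs us).foldl (fun m p => m.modify p.1 [] (fun l => l ++ [p.2])) PySem.Dict.empty).items)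
    (k := fun cu => cu.1) (v := fun cu => pvVal cu.1 cu.2)
    (d := (PySem.Dict.empty : PySem.Dict (Int × Int) (PySem.Set (Int × Int))))
    (fun a _ => PySem.Dict.contains_empty _) (by exact hndC)
  simp only [] at hfresh
  rw [hfresh]
  have hndB : (pvGroup (pvPairs us) PySem.Dict.empty).keys.Nodup := by
    unfold pvGroup
    exact PySem.Dict.nodup_keys_foldl_insert_key _
      (fun cu : (Int × Int) × List (Int × Int) => cu.1)
      (fun d cu => pvInner cu.1 cu.2 (d.getD cu.1 PySem.Set.empty)) PySem.Dict.empty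
      PySem.Dict.nodup_keys_empty
  have hkeysB : (pvGroup (pvPairs us) PySem.Dict.empty).keys
      = PySem.Set.update
          (PySem.Dict.empty : PySem.Dict (Int × Int) (PySem.Set (Int × Int))).keys
          ((pvPairs us).map (fun cu => cu.1)) := by
    unfold pvGroup
    exact PySem.Dict.keys_foldl_insert_key _
      (fun cu : (Int × Int) × List (Int × Int) => cu.1)
      (fun d cu => pvInner cu.1 cu.2 (d.getD cu.1 PySem.Set.empty)) PySem.Dict.empty
  rw [PySem.Dict.items_eq_map_keys _ hndC [], PySem.Dict.items_eq_map_keys _ hndB PySem.Set.empty,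
    List.map_map, PySem.Dict.keys_foldl_modify_key, hkeysB]
  have hemp : (PySem.Dict.empty : PySem.Dict (Int × Int) (PySem.Set (Int × Int))).items = [] := rfl
  rw [hemp, List.nil_append]
  apply List.map_congr_left
  intro k _
  simp only [Function.comp]
  have hA : ((pvPairs us).foldl (fun m p => m.modify p.1 [] (fun l => l ++ [p.2]))
      PySem.Dict.empty).getD k []
      = ((pvPairs us).filter (fun p => p.1 == k)).map (fun x => x.2) := by
    rw [PySem.Dict.getD_foldl_modify_append, PySem.Dict.getD_empty]
    simp
  have hB : (pvGroup (pvPairs us) PySem.Dict.empty).getD k PySem.Set.empty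
      = ((pvPairs us).filter (fun cu => cu.1 == k)).foldl (fun s cu => pvInner k cu.2 s)
        PySem.Set.empty := by
    rw [pv_getD_group, PySem.Dict.getD_empty]
  rw [hA, hB]
  simp [pvVal, List.foldl_map]

-- ===== VERDICT (by name: the statement is the Claim_ definition above) =====
theorem peers_map_spec : Claim_equal_peers_map := by
  intro us _
  exact pv_main us
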